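-- pv_equiv track=rewrite | github.com/miraclemore/leetcode | algorithms/python/1300-find-best-value/1300-find-best-value.py | find_bset_value
-- ===== SOURCE A (Python) =====
-- def calc_sum(arr: list[int], value):
--     return sum(value if num >= value else num for num in arr)
--
-- def find_bset_value(arr: list[int], target: int) -> int:
--     # arr.sort()
--     left = 0
--     right = max(arr)
--
--     while left < right - 1:
--         mid = left + (right - left) // 2
--         sum = calc_sum(arr, mid)
--
--         if sum - target > 0:
--             right = mid
--         elif sum - target < 0:
--             left = mid
--         else:
--             return mid
--
--     left_dis = abs(calc_sum(arr, left) - target)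
--     right_dis = abs(calc_sum(arr, right) - target)
--     if left_dis <= right_dis:
--         return left
--     else:
--         return right
-- ===== SOURCE B (Python) =====
-- def find_bset_value(arr: list[int], target: int) -> int:
--     # Sort + running prefix sum: find the segment where the clipped sum crosses
--     # target, then pick the best threshold by integer arithmetic (clamped to >= 0).
--     xs = sorted(arr)
--     n = len(xs)
--     total = 0
--     for i, x in enumerate(xs):
--         m = n - i
--         if total + x * m >= target:
--             v, r = divmod(target - total, m)
--             if 2 * r > m:
--                 v += 1
--             return max(v, 0)
--         total += x
--     return max(xs[-1], 0)
-- ===== Notes on version B (the rewrite author's own statement) =====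
-- stated objective: faster
-- what changed: A binary-searches the threshold over the value range, rescanning the whole array for each candidate's clipped sum; B sorts once, walks the sorted array with a running prefix sum to find the segment where the clipped sum crosses target, and picks the best threshold by one divmod (clamped to >= 0).
import Mathlib
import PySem

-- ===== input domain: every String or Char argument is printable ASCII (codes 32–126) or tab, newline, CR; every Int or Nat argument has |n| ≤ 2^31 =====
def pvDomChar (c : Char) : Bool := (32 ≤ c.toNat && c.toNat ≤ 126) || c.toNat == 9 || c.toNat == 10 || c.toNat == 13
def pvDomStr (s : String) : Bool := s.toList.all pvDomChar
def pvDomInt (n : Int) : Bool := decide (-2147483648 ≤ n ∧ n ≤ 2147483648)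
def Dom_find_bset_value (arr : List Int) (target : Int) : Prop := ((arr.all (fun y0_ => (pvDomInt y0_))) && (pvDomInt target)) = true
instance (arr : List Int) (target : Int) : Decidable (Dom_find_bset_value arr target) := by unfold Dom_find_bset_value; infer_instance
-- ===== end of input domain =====

-- B re-implements A by sorting once and locating the crossing segment with a running
-- prefix sum, instead of A's binary search over the value range that rescans the array.

-- ===== PORT A =====
-- calc_sum(arr, value) = sum(value if num >= value else num for num in arr)
def calcSum (arr : List Int) (value : Int) : Int :=
  arr.foldl (fun acc num => acc + (if num ≥ value then value else num)) 0

-- the `while left < right - 1` loop, then the final left_dis/right_dis comparison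
def findLoop (arr : List Int) (target : Int) (left right : Int) : Int :=
  if _h : left < right - 1 then
    let mid := left + PySem.Int.floordiv (right - left) 2
    let s := calcSum arr mid
    if s - target > 0 then findLoop arr target left mid
    else if s - target < 0 then findLoop arr target mid right
    else mid
  else
    let left_dis := |calcSum arr left - target|
    let right_dis := |calcSum arr right - target|
    if left_dis ≤ right_dis then left else right
termination_by (right - left).toNat
decreasing_by
  · rw [PySem.Int.floordiv_eq_ediv_of_pos (by omega : (0:Int) < 2)] at *; omega
  · rw [PySem.Int.floordiv_eq_ediv_of_pos (by omega : (0:Int) < 2)] at *; omega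

def find_bset_value (arr : List Int) (target : Int) : Int :=
  -- max(arr) raises ValueError on the empty list: excluded by Pre_
  match PySem.List.max? arr (fun y => y) with
  | none => 0
  | some right => findLoop arr target 0 right

-- ===== PORT B =====
-- the `for i, x in enumerate(xs)` loop of Source B, carrying i and the running prefix sum
def altGo (target : Int) (n : Int) : Int → Int → List Int → Option Int
  | _, _, [] => none
  | i, total, x :: rest =>
    let m := n - i
    if total + x * m ≥ target then
      -- divmod(target - total, m); here m = n - i ≥ 1, so divmod? is never none
      let vr := (PySem.Int.divmod? (target - total) m).getD (0, 0)
      let v := if 2 * vr.2 > m then vr.1 + 1 else vr.1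
      some (max v 0)
    else altGo target n (i + 1) (total + x) rest

def find_bset_value_alt (arr : List Int) (target : Int) : Int :=
  let xs := PySem.List.sorted arr (fun y => y) false
  match altGo target (xs.length : Int) 0 0 xs with
  | some v => v
  | none => max ((PySem.List.pyGet? xs (-1)).getD 0) 0  -- xs[-1]; empty list raises IndexError: excluded by Pre_

-- ===== PRECONDITION & SPEC =====
-- Pre_ excludes only the empty list, where A raises ValueError (max([])) and B raises IndexError (xs[-1]).
def Pre_find_bset_value (arr : List Int) (target : Int) : Prop := arr ≠ []
instance (arr : List Int) (target : Int) : Decidable (Pre_find_bset_value arr target) := by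
  unfold Pre_find_bset_value; infer_instance

def pvWitness_find_bset_value : List Int × Int := ([2, 7, 1], 10)

def Spec_find_bset_value (arr : List Int) (target : Int) (out : Int) : Prop := out = find_bset_value_alt arr target
instance (arr : List Int) (target : Int) (out : Int) : Decidable (Spec_find_bset_value arr target out) := by
  unfold Spec_find_bset_value; infer_instance

-- ===== CLAIM (what is proved, stated in full; the proofs are below) =====
def Claim_equal_find_bset_value : Prop := ∀ (arr : List Int) (target : Int), Dom_find_bset_value arr target → Pre_find_bset_value arr target → Spec_find_bset_value arr target (find_bset_value arr target)

-- ===== LEMMAS AND PROOFS =====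

-- the clipped sum, in sum-of-min form
def clip (arr : List Int) (v : Int) : Int := (arr.map (fun num => min num v)).sum

-- `res` is the least minimizer of |clip arr · - t| over [0, hi] (and 0 when hi < 0):
-- both programs return exactly this value, which pins them to each other.
def IsAns (arr : List Int) (t hi res : Int) : Prop :=
  0 ≤ res ∧ res ≤ max hi 0 ∧
    ∀ w, 0 ≤ w → w ≤ hi →
      |clip arr res - t| < |clip arr w - t| ∨ (|clip arr res - t| = |clip arr w - t| ∧ res ≤ w)

lemma calcSum_aux (arr : List Int) (v acc : Int) :
    arr.foldl (fun acc num => acc + (if num ≥ v then v else num)) acc = acc + clip arr v := by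
  induction arr generalizing acc with
  | nil => simp [clip]
  | cons x rest ih =>
    simp only [List.foldl_cons, clip, List.map_cons, List.sum_cons] at *
    rw [ih]
    have : (if x ≥ v then v else x) = min x v := by split_ifs <;> omega
    omega

lemma calcSum_eq_clip (arr : List Int) (v : Int) : calcSum arr v = clip arr v := by
  have := calcSum_aux arr v 0; simpa [calcSum] using this

lemma clip_mono (arr : List Int) {a b : Int} (h : a ≤ b) : clip arr a ≤ clip arr b := by
  unfold clip
  exact List.sum_le_sum (fun i _ => min_le_min le_rfl h)

lemma clip_strict (arr : List Int) {a b : Int} (h : a < b) (hm : ∃ x ∈ arr, b ≤ x) :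
    clip arr a < clip arr b := by
  induction arr with
  | nil => simp at hm
  | cons x rest ih =>
    obtain ⟨y, hy, hby⟩ := hm
    simp only [clip, List.map_cons, List.sum_cons] at *
    rcases List.mem_cons.mp hy with hxy | hyr
    · have h1 : min x a = a := by omega
      have h2 : min x b = b := by omega
      have := clip_mono rest (le_of_lt h)
      simp only [clip] at this; omega
    · have h1 : min x a ≤ min x b := by omega
      have := ih ⟨y, hyr, hby⟩; omega

lemma clip_const (arr : List Int) {a b : Int} (ha : ∀ x ∈ arr, x ≤ a) (hb : ∀ x ∈ arr, x ≤ b) :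
    clip arr a = clip arr b := by
  unfold clip
  congr 1
  apply List.map_congr_left
  intro x hx
  have := ha x hx; have := hb x hx; omega

lemma clip_split (pre suf : List Int) {u : Int} (hp : ∀ p ∈ pre, p ≤ u) (hs : ∀ s ∈ suf, u ≤ s) :
    clip (pre ++ suf) u = pre.sum + u * suf.length := by
  unfold clip
  rw [List.map_append, List.sum_append]
  congr 1
  · rw [List.map_congr_left (fun x hx => by have := hp x hx; omega : ∀ x ∈ pre, min x u = x)]
    simp
  · induction suf with
    | nil => simp
    | cons s rest ih =>
      simp only [List.map_cons, List.sum_cons, List.length_cons]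
      rw [ih (fun x hx => hs x (List.mem_cons_of_mem _ hx))]
      have := hs s (List.mem_cons_self ..)
      have : min s u = u := by omega
      rw [this]; push_cast; ring

lemma clip_eq_sum (xs : List Int) {a : Int} (h : ∀ x ∈ xs, x ≤ a) : clip xs a = xs.sum := by
  have := clip_split xs [] h (by simp)
  simpa using this

lemma isAns_unique {arr : List Int} {t hi r1 r2 : Int}
    (h1 : IsAns arr t hi r1) (h2 : IsAns arr t hi r2) : r1 = r2 := by
  obtain ⟨h10, h1b, h1m⟩ := h1
  obtain ⟨h20, h2b, h2m⟩ := h2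
  rcases le_or_gt 0 hi with hpos | hneg
  · have e1 := h1m r2 h20 (by omega)
    have e2 := h2m r1 h10 (by omega)
    rcases e1 with e1 | ⟨e1, l1⟩ <;> rcases e2 with e2 | ⟨e2, l2⟩ <;> omega
  · omega

lemma mem_le_getLast : ∀ (xs : List Int), xs.Pairwise (· ≤ ·) → ∀ (h : xs ≠ []),
    ∀ x ∈ xs, x ≤ xs.getLast h := by
  intro xs
  induction xs with
  | nil => simp
  | cons y ys ih =>
    intro hp h x hx
    rcases eq_or_ne ys [] with rfl | hne
    · simp at hx; subst hx; simp
    · rw [List.getLast_cons hne]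
      rcases List.mem_cons.mp hx with rfl | hx2
      · exact (List.pairwise_cons.mp hp).1 _ (List.getLast_mem hne)
      · exact ih (List.pairwise_cons.mp hp).2 hne x hx2

lemma pyGet_neg_one {xs : List Int} (h : xs ≠ []) :
    PySem.List.pyGet? xs (-1) = some (xs.getLast h) := by
  have hlen : 1 ≤ xs.length := List.length_pos_iff.mpr h
  simp only [PySem.List.pyGet?, PySem.List.pyIdx?]
  rw [if_neg (by omega), if_pos (by omega : -((xs.length:Nat):Int) ≤ -1)]
  norm_num
  rw [← List.getLast?_eq_getElem?]
  exact List.getLast?_eq_some_getLast h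

lemma loop_correct (arr : List Int) (t hi : Int) (hmem : hi ∈ arr) :
    ∀ l r, 0 ≤ l → l ≤ r → r ≤ hi →
      (∀ w, 0 ≤ w → w ≤ hi → (w < l ∨ r < w) →
        min (|clip arr l - t|) (|clip arr r - t|) < |clip arr w - t|) →
      IsAns arr t hi (findLoop arr t l r) := by
  have main : ∀ k l r, (r - l).toNat = k → 0 ≤ l → l ≤ r → r ≤ hi →
      (∀ w, 0 ≤ w → w ≤ hi → (w < l ∨ r < w) →
        min (|clip arr l - t|) (|clip arr r - t|) < |clip arr w - t|) →
      IsAns arr t hi (findLoop arr t l r) := by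
    intro k
    induction k using Nat.strong_induction_on with
    | _ k ih =>
      intro l r hk hl hlr hr hinv
      rw [findLoop]
      by_cases hc : l < r - 1
      · rw [dif_pos hc]
        simp only [calcSum_eq_clip, PySem.Int.floordiv_eq_ediv_of_pos (by omega : (0:Int) < 2)]
        set mid := l + (r - l) / 2 with hmid
        have hm1 : l < mid := by omega
        have hm2 : mid < r := by omega
        by_cases hgt : clip arr mid - t > 0
        · rw [if_pos hgt]
          have hmr : clip arr mid ≤ clip arr r := clip_mono arr (le_of_lt hm2)
          refine ih (mid - l).toNat (by omega) l mid rfl hl (by omega) (by omega) ?_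
          intro w hw0 hwhi hout
          rcases hout with hwl | hwmid
          · have h1 := hinv w hw0 hwhi (Or.inl hwl)
            rcases abs_cases (clip arr l - t) with ⟨e1,f1⟩|⟨e1,f1⟩ <;>
              rcases abs_cases (clip arr r - t) with ⟨e2,f2⟩|⟨e2,f2⟩ <;>
              rcases abs_cases (clip arr mid - t) with ⟨e3,f3⟩|⟨e3,f3⟩ <;> omega
          · have hsw : clip arr mid < clip arr w :=
              clip_strict arr hwmid ⟨hi, hmem, hwhi⟩
            rcases abs_cases (clip arr w - t) with ⟨e1,f1⟩|⟨e1,f1⟩ <;>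
              rcases abs_cases (clip arr mid - t) with ⟨e3,f3⟩|⟨e3,f3⟩ <;> omega
        · rw [if_neg hgt]
          by_cases hlt : clip arr mid - t < 0
          · rw [if_pos hlt]
            have hlm : clip arr l ≤ clip arr mid := clip_mono arr (le_of_lt hm1)
            refine ih (r - mid).toNat (by omega) mid r rfl (by omega) (by omega) hr ?_
            intro w hw0 hwhi hout
            rcases hout with hwl | hwmid
            · by_cases hwl2 : w < l
              · have h1 := hinv w hw0 hwhi (Or.inl hwl2)
                rcases abs_cases (clip arr l - t) with ⟨e1,f1⟩|⟨e1,f1⟩ <;>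
                  rcases abs_cases (clip arr r - t) with ⟨e2,f2⟩|⟨e2,f2⟩ <;>
                  rcases abs_cases (clip arr mid - t) with ⟨e3,f3⟩|⟨e3,f3⟩ <;> omega
              · have hsw : clip arr w < clip arr mid :=
                  clip_strict arr hwl ⟨hi, hmem, by omega⟩
                rcases abs_cases (clip arr w - t) with ⟨e1,f1⟩|⟨e1,f1⟩ <;>
                  rcases abs_cases (clip arr mid - t) with ⟨e3,f3⟩|⟨e3,f3⟩ <;> omega
            · have h1 := hinv w hw0 hwhi (Or.inr hwmid)
              rcases abs_cases (clip arr l - t) with ⟨e1,f1⟩|⟨e1,f1⟩ <;>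
                rcases abs_cases (clip arr r - t) with ⟨e2,f2⟩|⟨e2,f2⟩ <;>
                rcases abs_cases (clip arr mid - t) with ⟨e3,f3⟩|⟨e3,f3⟩ <;> omega
          · rw [if_neg hlt]
            refine ⟨by omega, by omega, ?_⟩
            intro w hw0 hwhi
            rcases lt_trichotomy w mid with hwm | hwm | hwm
            · have hsw : clip arr w < clip arr mid :=
                clip_strict arr hwm ⟨hi, hmem, by omega⟩
              left
              rcases abs_cases (clip arr w - t) with ⟨e1,f1⟩|⟨e1,f1⟩ <;>
                rcases abs_cases (clip arr mid - t) with ⟨e3,f3⟩|⟨e3,f3⟩ <;> omega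
            · right; constructor
              · rw [hwm]
              · omega
            · have hsw : clip arr mid < clip arr w :=
                clip_strict arr hwm ⟨hi, hmem, hwhi⟩
              left
              rcases abs_cases (clip arr w - t) with ⟨e1,f1⟩|⟨e1,f1⟩ <;>
                rcases abs_cases (clip arr mid - t) with ⟨e3,f3⟩|⟨e3,f3⟩ <;> omega
      · rw [dif_neg hc]
        simp only [calcSum_eq_clip]
        by_cases hle : |clip arr l - t| ≤ |clip arr r - t|
        · rw [if_pos hle]
          refine ⟨hl, by omega, ?_⟩
          intro w hw0 hwhi
          rcases lt_trichotomy w l with hwl | hwl | hwl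
          · have h1 := hinv w hw0 hwhi (Or.inl hwl)
            left; omega
          · right; exact ⟨by rw [hwl], by omega⟩
          · by_cases hwr : r < w
            · have h1 := hinv w hw0 hwhi (Or.inr hwr)
              left; omega
            · have hwr2 : w = r := by omega
              rw [hwr2]; omega
        · rw [if_neg hle]
          refine ⟨by omega, by omega, ?_⟩
          intro w hw0 hwhi
          rcases lt_trichotomy w l with hwl | hwl | hwl
          · have h1 := hinv w hw0 hwhi (Or.inl hwl)
            left; omega
          · subst hwl; left; omega
          · by_cases hwr : r < w
            · have h1 := hinv w hw0 hwhi (Or.inr hwr)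
              left; omega
            · have hwr2 : w = r := by omega
              rw [hwr2]; right; exact ⟨rfl, by omega⟩
  intro l r hl hlr hr hinv
  exact main (r - l).toNat l r rfl hl hlr hr hinv

lemma A_isAns (arr : List Int) (t hi : Int)
    (hmaxeq : PySem.List.max? arr (fun y => y) = some hi) :
    IsAns arr t hi (find_bset_value arr t) := by
  have hmax : ∀ y ∈ arr, y ≤ hi := PySem.List.max?_isMax hmaxeq
  have hmem : hi ∈ arr := PySem.List.max?_mem hmaxeq
  have hred : find_bset_value arr t = findLoop arr t 0 hi := by
    unfold find_bset_value; rw [hmaxeq]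
  rw [hred]
  rcases le_or_gt 0 hi with h0 | h0
  · refine loop_correct arr t hi hmem 0 hi le_rfl h0 le_rfl ?_
    intro w hw0 hwhi hout
    rcases hout with h | h <;> omega
  · rw [findLoop, dif_neg (by omega)]
    simp only [calcSum_eq_clip]
    have hceq : clip arr 0 = clip arr hi :=
      clip_const arr (fun x hx => by have := hmax x hx; omega) hmax
    rw [hceq, if_pos le_rfl]
    exact ⟨le_rfl, by omega, fun w hw0 hwhi => by omega⟩

-- transfer of the loop invariant one prefix element further, for both altGo lemmas
lemma inv_step {t : Int} (pre : List Int) (x : Int) (rest : List Int)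
    (hpx : ∀ p ∈ pre, p ≤ x)
    (hb : ∀ p ∈ pre, pre.sum + p * ((rest.length : Int) + 1) < t)
    (hc : ¬ pre.sum + x * ((rest.length : Int) + 1) ≥ t) :
    ∀ p ∈ pre ++ [x], (pre ++ [x]).sum + p * (rest.length : Int) < t := by
  intro p hp
  rw [List.sum_append, List.sum_cons, List.sum_nil]
  rcases List.mem_append.mp hp with hp | hp
  · have h1 := hb p hp
    have h2 := mul_le_mul_of_nonneg_right (hpx p hp) (by positivity : (0:Int) ≤ (rest.length : Int))
    nlinarith
  · rw [List.mem_singleton.mp hp]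
    nlinarith

lemma altGo_none (xs : List Int) (t : Int) (hsort : xs.Pairwise (· ≤ ·)) :
    ∀ suf pre, xs = pre ++ suf →
      (∀ p ∈ pre, pre.sum + p * (suf.length : Int) < t) →
      altGo t (xs.length : Int) (pre.length : Int) pre.sum suf = none →
      ∀ p ∈ xs, xs.sum < t := by
  intro suf
  induction suf with
  | nil =>
    intro pre hx hb _ p hp
    rw [hx, List.append_nil] at hp ⊢
    have := hb p hp
    simpa using this
  | cons x rest ih =>
    intro pre hx hb hnone p hp
    simp only [altGo] at hnone
    have hm : (xs.length : Int) - (pre.length : Int) = (rest.length : Int) + 1 := by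
      rw [hx]; simp [List.length_append]
    rw [hm] at hnone
    by_cases hc : pre.sum + x * ((rest.length : Int) + 1) ≥ t
    · rw [if_pos hc] at hnone; simp at hnone
    · rw [if_neg hc] at hnone
      have hpx : ∀ q ∈ pre, q ≤ x := fun q hq =>
        (List.pairwise_append.mp (hx ▸ hsort)).2.2 q hq x (List.mem_cons_self ..)
      have hcast : ((pre ++ [x]).length : Int) = (pre.length : Int) + 1 := by
        simp [List.length_append]
      have hsum : (pre ++ [x]).sum = pre.sum + x := by simp
      refine ih (pre ++ [x]) (by rw [hx]; simp) (inv_step pre x rest hpx hb hc) ?_ p hp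
      rw [hcast, hsum]
      exact hnone

lemma altGo_some (xs : List Int) (t hi : Int)
    (hsort : xs.Pairwise (· ≤ ·)) (hmax : ∀ x ∈ xs, x ≤ hi) :
    ∀ suf pre, xs = pre ++ suf →
      (∀ p ∈ pre, pre.sum + p * (suf.length : Int) < t) →
      ∀ v, altGo t (xs.length : Int) (pre.length : Int) pre.sum suf = some v →
        IsAns xs t hi v := by
  intro suf
  induction suf with
  | nil => intro pre hx hb v hsome; simp [altGo] at hsome
  | cons x rest ih =>
    intro pre hx hb v hsome
    simp only [altGo] at hsome
    have hm : (xs.length : Int) - (pre.length : Int) = (rest.length : Int) + 1 := by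
      rw [hx]; simp [List.length_append]
    rw [hm] at hsome
    have hxmem : x ∈ xs := by rw [hx]; exact List.mem_append_right _ (List.mem_cons_self ..)
    have hpx : ∀ q ∈ pre, q ≤ x := fun q hq =>
      (List.pairwise_append.mp (hx ▸ hsort)).2.2 q hq x (List.mem_cons_self ..)
    by_cases hc : pre.sum + x * ((rest.length : Int) + 1) ≥ t
    · rw [if_pos hc] at hsome
      set m : Int := (rest.length : Int) + 1 with hmdef
      have hmpos : 0 < m := by positivity
      have hor : 0 ≤ m ∨ m ∣ (t - pre.sum) := Or.inl hmpos.le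
      have hdm : PySem.Int.divmod? (t - pre.sum) m =
          some ((t - pre.sum) / m, (t - pre.sum) % m) := by
        simp [PySem.Int.divmod?, hmpos.ne', Int.fdiv_eq_ediv, Int.fmod_eq_emod, hor]
      rw [hdm] at hsome
      simp only [Option.getD_some, Option.some_inj] at hsome
      set v0 : Int := (t - pre.sum) / m with hv0
      set r0 : Int := (t - pre.sum) % m with hr0def
      have hr0 : 0 ≤ r0 := Int.emod_nonneg _ hmpos.ne'
      have hr1 : r0 < m := Int.emod_lt_of_pos _ hmpos
      have heq : m * v0 + r0 = t - pre.sum := Int.mul_ediv_add_emod _ _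
      have hvx : v0 ≤ x := by
        have h1 : m * v0 ≤ m * x := by nlinarith [mul_comm x m]
        exact le_of_mul_le_mul_left h1 hmpos
      have hpv : ∀ q ∈ pre, q ≤ v0 := by
        intro q hq
        have h1 := hb q hq
        simp only [List.length_cons] at h1
        push_cast at h1
        have h2 : m * q < m * (v0 + 1) := by nlinarith [mul_comm q m]
        have h3 := lt_of_mul_lt_mul_left h2 hmpos.le
        omega
      have hsufge : ∀ s ∈ x :: rest, x ≤ s := by
        intro s hs
        rcases List.mem_cons.mp hs with rfl | hs
        · exact le_refl s
        · exact (List.pairwise_cons.mp (List.pairwise_append.mp (hx ▸ hsort)).2.1).1 s hs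
      have hseg : ∀ u, (∀ q ∈ pre, q ≤ u) → u ≤ x → clip xs u = pre.sum + u * m := by
        intro u hqu hux
        rw [hx, clip_split pre (x :: rest) hqu (fun s hs => le_trans hux (hsufge s hs))]
        simp [hmdef]
      have hA : clip xs v0 = t - r0 := by
        rw [hseg v0 hpv hvx]; nlinarith [mul_comm v0 m]
      have hB : v0 < x → clip xs (v0 + 1) = t - r0 + m := by
        intro h
        rw [hseg (v0 + 1) (fun q hq => by have := hpv q hq; omega) (by omega)]
        nlinarith [mul_comm (v0+1) m]
      have hC : v0 = x → r0 = 0 := by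
        intro h
        have : m * x + r0 ≤ m * x := by nlinarith [mul_comm x m]
        omega
      have hxhi : x ≤ hi := hmax x hxmem
      by_cases hrm : 2 * r0 > m
      · rw [if_pos hrm] at hsome
        have hv0x : v0 < x := by
          rcases lt_or_eq_of_le hvx with h | h
          · exact h
          · have := hC h; omega
        have hB1 := hB hv0x
        by_cases hvpos : 0 ≤ v0 + 1
        · have hres : v = v0 + 1 := by omega
          subst hres
          refine ⟨hvpos, by omega, ?_⟩
          intro w hw0 hwhi
          by_cases hwv : w ≤ v0
          · have h1 : clip xs w ≤ clip xs v0 := clip_mono xs hwv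
            left
            rcases abs_cases (clip xs w - t) with ⟨e1,f1⟩|⟨e1,f1⟩ <;>
              rcases abs_cases (clip xs (v0+1) - t) with ⟨e2,f2⟩|⟨e2,f2⟩ <;> omega
          · have h1 : clip xs (v0+1) ≤ clip xs w := clip_mono xs (by omega)
            rcases abs_cases (clip xs w - t) with ⟨e1,f1⟩|⟨e1,f1⟩ <;>
              rcases abs_cases (clip xs (v0+1) - t) with ⟨e2,f2⟩|⟨e2,f2⟩ <;> omega
        · have hres : v = 0 := by omega
          subst hres
          refine ⟨le_refl 0, by omega, ?_⟩
          intro w hw0 hwhi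
          have h0 : clip xs (v0+1) ≤ clip xs 0 := clip_mono xs (by omega)
          have h1 : clip xs 0 ≤ clip xs w := clip_mono xs hw0
          rcases abs_cases (clip xs w - t) with ⟨e1,f1⟩|⟨e1,f1⟩ <;>
            rcases abs_cases (clip xs 0 - t) with ⟨e2,f2⟩|⟨e2,f2⟩ <;> omega
      · rw [if_neg hrm] at hsome
        by_cases hvpos : 0 ≤ v0
        · have hres : v = v0 := by omega
          subst hres
          refine ⟨hvpos, by omega, ?_⟩
          intro w hw0 hwhi
          rcases lt_trichotomy w v0 with hwv | hwv | hwv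
          · have h1 : clip xs w < clip xs v0 := clip_strict xs hwv ⟨x, hxmem, hvx⟩
            left
            rcases abs_cases (clip xs w - t) with ⟨e1,f1⟩|⟨e1,f1⟩ <;>
              rcases abs_cases (clip xs v0 - t) with ⟨e2,f2⟩|⟨e2,f2⟩ <;> omega
          · subst hwv
            right; exact ⟨rfl, le_refl _⟩
          · rcases lt_or_eq_of_le hvx with hx2 | hx2
            · have hB1 := hB hx2
              have h1 : clip xs (v0+1) ≤ clip xs w := clip_mono xs (by omega)
              rcases abs_cases (clip xs w - t) with ⟨e1,f1⟩|⟨e1,f1⟩ <;>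
                rcases abs_cases (clip xs v0 - t) with ⟨e2,f2⟩|⟨e2,f2⟩ <;> omega
            · have hr00 := hC hx2
              rcases abs_cases (clip xs w - t) with ⟨e1,f1⟩|⟨e1,f1⟩ <;>
                rcases abs_cases (clip xs v0 - t) with ⟨e2,f2⟩|⟨e2,f2⟩ <;> omega
        · have hres : v = 0 := by omega
          subst hres
          refine ⟨le_refl 0, by omega, ?_⟩
          intro w hw0 hwhi
          have hkey : t ≤ clip xs 0 := by
            rcases lt_or_eq_of_le hvx with hx2 | hx2
            · have hB1 := hB hx2
              have h0 : clip xs (v0+1) ≤ clip xs 0 := clip_mono xs (by omega)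
              omega
            · have hr00 := hC hx2
              have h0 : clip xs v0 ≤ clip xs 0 := clip_mono xs (by omega)
              omega
          have h1 : clip xs 0 ≤ clip xs w := clip_mono xs hw0
          rcases abs_cases (clip xs w - t) with ⟨e1,f1⟩|⟨e1,f1⟩ <;>
            rcases abs_cases (clip xs 0 - t) with ⟨e2,f2⟩|⟨e2,f2⟩ <;> omega
    · rw [if_neg hc] at hsome
      have hcast : ((pre ++ [x]).length : Int) = (pre.length : Int) + 1 := by
        simp [List.length_append]
      have hsum : (pre ++ [x]).sum = pre.sum + x := by simp
      refine ih (pre ++ [x]) (by rw [hx]; simp) (inv_step pre x rest hpx hb hc) v ?_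
      rw [hcast, hsum]
      exact hsome

lemma B_isAns (arr : List Int) (t hi : Int) (hne : arr ≠ [])
    (hmaxeq : PySem.List.max? arr (fun y => y) = some hi) :
    IsAns arr t hi (find_bset_value_alt arr t) := by
  have hmaxA : ∀ y ∈ arr, y ≤ hi := PySem.List.max?_isMax hmaxeq
  have hmemA : hi ∈ arr := PySem.List.max?_mem hmaxeq
  set xs := PySem.List.sorted arr (fun y => y) false with hxs
  have hperm : xs.Perm arr := PySem.List.sorted_perm arr _ _
  have hsort : xs.Pairwise (· ≤ ·) := PySem.List.sorted_pairwise arr (fun y => y)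
  have hclip : ∀ v, clip xs v = clip arr v := fun v => (hperm.map _).sum_eq
  have hmax : ∀ y ∈ xs, y ≤ hi := fun y hy => hmaxA y (hperm.mem_iff.mp hy)
  have hmem : hi ∈ xs := hperm.mem_iff.mpr hmemA
  have hnex : xs ≠ [] := by
    intro hh
    rw [hh] at hperm
    exact hne hperm.symm.eq_nil
  have htrans : ∀ R, IsAns xs t hi R → IsAns arr t hi R := by
    intro R h
    obtain ⟨h1, h2, h3⟩ := h
    exact ⟨h1, h2, fun w hw0 hwhi => by
      have := h3 w hw0 hwhi; rw [hclip, hclip] at this; exact this⟩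
  apply htrans
  show IsAns xs t hi (match altGo t (xs.length : Int) 0 0 xs with
    | some v => v
    | none => max ((PySem.List.pyGet? xs (-1)).getD 0) 0)
  cases hgo : altGo t (xs.length : Int) 0 0 xs with
  | some v =>
    have := altGo_some xs t hi hsort hmax xs [] (by simp) (by simp) v (by simpa using hgo)
    simpa [hgo] using this
  | none =>
    have hsum : xs.sum < t :=
      altGo_none xs t hsort xs [] (by simp) (by simp) (by simpa using hgo) hi hmem
    have hlast : xs.getLast hnex = hi := by
      have h1 := mem_le_getLast xs hsort hnex hi hmem
      have h2 := hmax _ (List.getLast_mem hnex)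
      omega
    simp only [pyGet_neg_one hnex, Option.getD_some, hlast]
    have hchi : clip xs hi = xs.sum := clip_eq_sum xs hmax
    rcases le_or_gt 0 hi with h0 | h0
    · have hmx : max hi 0 = hi := by omega
      rw [hmx]
      refine ⟨h0, by omega, ?_⟩
      intro w hw0 hwhi
      rcases lt_or_eq_of_le hwhi with hw | hw
      · have h1 : clip xs w < clip xs hi := clip_strict xs hw ⟨hi, hmem, le_rfl⟩
        left
        rcases abs_cases (clip xs w - t) with ⟨e1,f1⟩|⟨e1,f1⟩ <;>
          rcases abs_cases (clip xs hi - t) with ⟨e2,f2⟩|⟨e2,f2⟩ <;> omega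
      · subst hw
        right; exact ⟨rfl, le_rfl⟩
    · have hres : max hi 0 = 0 := by omega
      rw [hres]
      exact ⟨le_rfl, by omega, fun w hw0 hwhi => by omega⟩

-- ===== VERDICT (by name: the statement is the Claim_ definition above) =====
theorem find_bset_value_spec : Claim_equal_find_bset_value := by
  intro arr t _hdom hpre
  unfold Pre_find_bset_value at hpre
  obtain ⟨hi, hhi⟩ : ∃ hi, PySem.List.max? arr (fun y => y) = some hi := by
    cases h : PySem.List.max? arr (fun y => y) with
    | none => exact absurd ((PySem.List.max?_eq_none_iff arr _).mp h) hpre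
    | some m => exact ⟨m, rfl⟩
  exact isAns_unique (A_isAns arr t hi hhi) (B_isAns arr t hi hpre hhi)
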